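-- pv_equiv track=rewrite | github.com/mnazaar/MTechCreditScoreVFL | VFLClientModels/dataset/generate_credit_data.py | generate_tax_id
-- ===== SOURCE A (Python) =====
-- def generate_tax_id(n, offset=0):
--     """Generate n unique tax IDs in format XXX-XX-XXXX"""
--     tax_ids = []
--
--     for i in range(n):
--         # Create absolutely unique tax ID using sequential approach
--         # Convert the sequential number to a unique tax ID format
--         seq_num = offset + i
--
--         # Use a large base to ensure we don't run out of combinations
--         # and convert to tax ID format
--
--         # Method: treat the 9-digit space as a single large number space
--         # and convert each sequential number to XXX-XX-XXXX format
--
--         # Calculate the position in the 9-digit space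
--         # Total possible combinations: 900 * 90 * 9000 = 729,000,000
--
--         # Extract digits directly from the sequential number
--         temp_num = seq_num
--
--         # Last 4 digits (XXXX part): 1000-9999
--         zzzz = 1000 + (temp_num % 9000)
--         temp_num = temp_num // 9000
--
--         # Middle 2 digits (XX part): 10-99
--         yy = 10 + (temp_num % 90)
--         temp_num = temp_num // 90
--
--         # First 3 digits (XXX part): 100-999
--         xxx = 100 + (temp_num % 900)
--
--         tax_id = f"{xxx:03d}-{yy:02d}-{zzzz:04d}"
--         tax_ids.append(tax_id)
--
--     return tax_ids
-- ===== SOURCE B (Python) =====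
-- def generate_tax_id(n, offset=0):
--     """Generate n unique tax IDs in format XXX-XX-XXXX"""
--     # Decompose the starting offset once, then advance an odometer.
--     zzzz = 1000 + offset % 9000
--     t = offset // 9000
--     yy = 10 + t % 90
--     xxx = 100 + (t // 90) % 900
--     tax_ids = []
--     for _ in range(n):
--         tax_ids.append(f"{xxx:03d}-{yy:02d}-{zzzz:04d}")
--         zzzz += 1
--         if zzzz > 9999:
--             zzzz = 1000
--             yy += 1
--             if yy > 99:
--                 yy = 10
--                 xxx += 1
--                 if xxx > 999:
--                     xxx = 100
--     return tax_ids
-- ===== Notes on version B (the rewrite author's own statement) =====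
-- stated objective: alternative
-- what changed: B computes the three ID fields (xxx, yy, zzzz) once from offset and then advances them as an odometer with cascading carries, instead of A's re-deriving all three fields from scratch by mod/floordiv for every sequence number.
import Mathlib
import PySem

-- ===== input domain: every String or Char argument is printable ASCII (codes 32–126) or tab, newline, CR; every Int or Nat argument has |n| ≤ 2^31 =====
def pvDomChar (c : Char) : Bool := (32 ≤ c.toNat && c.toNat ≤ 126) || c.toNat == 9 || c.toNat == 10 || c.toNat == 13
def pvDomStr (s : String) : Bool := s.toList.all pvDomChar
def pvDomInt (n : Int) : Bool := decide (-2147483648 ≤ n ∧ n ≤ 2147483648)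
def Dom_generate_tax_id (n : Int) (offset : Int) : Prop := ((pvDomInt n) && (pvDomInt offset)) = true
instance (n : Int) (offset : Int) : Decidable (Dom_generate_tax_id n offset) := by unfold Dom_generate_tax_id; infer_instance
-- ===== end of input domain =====

-- B replaces A's per-element mod/div decomposition of seq_num by computing the three
-- fields once from offset and advancing them as an odometer (objective: alternative).

-- f"{x:0wd}" for the nonnegative field values both programs format (exact for 0 ≤ x)
def pvPad (w : Nat) (x : Int) : List Char :=
  let s := PySem.Int.toChars x
  List.replicate (w - s.length) '0' ++ s

-- f"{xxx:03d}-{yy:02d}-{zzzz:04d}"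
def pvFmt (xxx yy zzzz : Int) : String :=
  String.ofList (pvPad 3 xxx ++ '-' :: pvPad 2 yy ++ '-' :: pvPad 4 zzzz)

-- ===== PORT A =====
def generate_tax_id (n : Int) (offset : Int) : List String :=
  (PySem.List.pyRange 0 n 1).foldl (fun tax_ids i =>
    let seq_num := offset + i
    let temp_num := seq_num
    let zzzz := 1000 + PySem.Int.mod temp_num 9000
    let temp_num := PySem.Int.floordiv temp_num 9000
    let yy := 10 + PySem.Int.mod temp_num 90
    let temp_num := PySem.Int.floordiv temp_num 90
    let xxx := 100 + PySem.Int.mod temp_num 900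
    tax_ids ++ [pvFmt xxx yy zzzz]) []

-- ===== PORT B =====
-- the odometer loop: append current fields, then advance with cascading carries
def pvOdo : Nat → Int → Int → Int → List String
  | 0, _, _, _ => []
  | k+1, xxx, yy, zzzz =>
    pvFmt xxx yy zzzz ::
      (if zzzz + 1 > 9999 then
        (if yy + 1 > 99 then
          (if xxx + 1 > 999 then pvOdo k 100 10 1000
           else pvOdo k (xxx + 1) 10 1000)
         else pvOdo k xxx (yy + 1) 1000)
       else pvOdo k xxx yy (zzzz + 1))

def generate_tax_id_alt (n : Int) (offset : Int) : List String :=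
  let zzzz := 1000 + PySem.Int.mod offset 9000
  let t := PySem.Int.floordiv offset 9000
  let yy := 10 + PySem.Int.mod t 90
  let xxx := 100 + PySem.Int.mod (PySem.Int.floordiv t 90) 900
  pvOdo n.toNat xxx yy zzzz

-- ===== PRECONDITION & SPEC =====
def Spec_generate_tax_id (n : Int) (offset : Int) (out : List String) : Prop := out = generate_tax_id_alt n offset
instance (n : Int) (offset : Int) (out : List String) : Decidable (Spec_generate_tax_id n offset out) := by unfold Spec_generate_tax_id; infer_instance

-- ===== CLAIM (what is proved, stated in full; the proofs are below) =====
def Claim_equal_generate_tax_id : Prop := ∀ (n : Int) (offset : Int), Dom_generate_tax_id n offset → Spec_generate_tax_id n offset (generate_tax_id n offset)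

-- ===== LEMMAS AND PROOFS =====

-- the formatted id of sequence number s, written with Lean's ediv/emod
def pvF (s : Int) : String :=
  pvFmt (100 + (s / 9000 / 90) % 900) (10 + (s / 9000) % 90) (1000 + s % 9000)

lemma pvOdo_succ (k : Nat) (s : Int) :
    pvOdo (k+1) (100 + (s / 9000 / 90) % 900) (10 + (s / 9000) % 90) (1000 + s % 9000)
      = pvF s :: pvOdo k (100 + ((s+1) / 9000 / 90) % 900) (10 + ((s+1) / 9000) % 90)
          (1000 + (s+1) % 9000) := by
  rw [pvOdo]
  congr 1
  by_cases h1 : s % 9000 = 8999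
  · rw [if_pos (by omega)]
    by_cases h2 : (s / 9000) % 90 = 89
    · rw [if_pos (by omega)]
      by_cases h3 : (s / 9000 / 90) % 900 = 899
      · rw [if_pos (by omega)]; congr 1 <;> omega
      · rw [if_neg (by omega)]; congr 1 <;> omega
    · rw [if_neg (by omega)]; congr 1 <;> omega
  · rw [if_neg (by omega)]; congr 1 <;> omega

lemma pvOdo_eq (k : Nat) : ∀ s : Int,
    pvOdo k (100 + (s / 9000 / 90) % 900) (10 + (s / 9000) % 90) (1000 + s % 9000)
      = (List.range k).map (fun i : Nat => pvF (s + (i : Int))) := by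
  induction k with
  | zero => intro s; simp [pvOdo]
  | succ k ih =>
    intro s
    rw [List.range_succ_eq_map, pvOdo_succ, ih (s+1)]
    simp only [List.map_cons, List.map_map, Function.comp_def, Nat.cast_zero, add_zero]
    congr 1
    apply List.map_congr_left
    intro i _
    congr 1
    push_cast
    ring

lemma generate_tax_id_eq_map (n offset : Int) :
    generate_tax_id n offset = (List.range n.toNat).map (fun i : Nat => pvF (offset + (i : Int))) := by
  unfold generate_tax_id
  have hr : PySem.List.pyRange 0 n 1 = PySem.List.pyRange 0 (n.toNat : Int) 1 := by
    rcases le_or_gt n 0 with h | h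
    · have : n.toNat = 0 := by omega
      rw [this]
      simp [PySem.List.pyRange]
      omega
    · congr 1; omega
  rw [hr, PySem.List.pyRange_zero_natCast, PySem.List.foldl_append_singleton_eq_map]
  simp only [List.nil_append, List.map_map]
  apply List.map_congr_left
  intro i _
  simp only [Function.comp_def, pvF]
  rw [PySem.Int.mod_eq_emod_of_pos (by norm_num), PySem.Int.floordiv_eq_ediv_of_pos (by norm_num),
    PySem.Int.mod_eq_emod_of_pos (by norm_num), PySem.Int.floordiv_eq_ediv_of_pos (by norm_num),
    PySem.Int.mod_eq_emod_of_pos (by norm_num)]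

-- ===== VERDICT (by name: the statement is the Claim_ definition above) =====
theorem generate_tax_id_spec : Claim_equal_generate_tax_id := by
  intro n offset _
  unfold Spec_generate_tax_id
  show generate_tax_id n offset =
    pvOdo n.toNat (100 + PySem.Int.mod (PySem.Int.floordiv (PySem.Int.floordiv offset 9000) 90) 900)
      (10 + PySem.Int.mod (PySem.Int.floordiv offset 9000) 90) (1000 + PySem.Int.mod offset 9000)
  rw [PySem.Int.mod_eq_emod_of_pos (b := 9000) (by norm_num),
    PySem.Int.floordiv_eq_ediv_of_pos (b := 9000) (by norm_num),
    PySem.Int.mod_eq_emod_of_pos (b := 90) (by norm_num),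
    PySem.Int.floordiv_eq_ediv_of_pos (b := 90) (by norm_num),
    PySem.Int.mod_eq_emod_of_pos (b := 900) (by norm_num)]
  rw [pvOdo_eq, generate_tax_id_eq_map]
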